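-- pv_equiv track=rewrite | github.com/timosarkar/FIDESlib-Metal | examples/resnet/weights/extract.py | build_mask
-- ===== SOURCE A (Python) =====
-- def build_mask(starting_padding, ending_padding, window_length, max_length):
--     mask = []
--     for i in range(starting_padding):
--         mask.append(0)
--     while len(mask) < (max_length - ending_padding):
--         for j in range(window_length):
--             mask.append(1)
--         mask.append(0)
--
--     while len(mask) > max_length:
--         mask.pop()
--     while len(mask) < max_length:
--         mask.append(0)
--
--     for i in range(ending_padding):
--         mask[max_length - i - 1] = 0
--
--     return mask
-- ===== SOURCE B (Python) =====
-- def build_mask(starting_padding, ending_padding, window_length, max_length):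
--     body_start = max(starting_padding, 0)
--     body_end = max_length - ending_padding
--     return [1 if (window_length > 0 and body_start <= i < body_end
--                   and (i - body_start) % (window_length + 1) < window_length) else 0
--             for i in range(max_length)]
-- ===== Notes on version B (the rewrite author's own statement) =====
-- stated objective: simpler
-- what changed: Replaces A's build/trim/pad/overwrite sequence (append prefix zeros, while-loop appending 1-blocks, pop-trim, zero-pad, then a second pass overwriting the tail) with a single list comprehension that computes every element directly from its index via modular arithmetic.
import Mathlib
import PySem

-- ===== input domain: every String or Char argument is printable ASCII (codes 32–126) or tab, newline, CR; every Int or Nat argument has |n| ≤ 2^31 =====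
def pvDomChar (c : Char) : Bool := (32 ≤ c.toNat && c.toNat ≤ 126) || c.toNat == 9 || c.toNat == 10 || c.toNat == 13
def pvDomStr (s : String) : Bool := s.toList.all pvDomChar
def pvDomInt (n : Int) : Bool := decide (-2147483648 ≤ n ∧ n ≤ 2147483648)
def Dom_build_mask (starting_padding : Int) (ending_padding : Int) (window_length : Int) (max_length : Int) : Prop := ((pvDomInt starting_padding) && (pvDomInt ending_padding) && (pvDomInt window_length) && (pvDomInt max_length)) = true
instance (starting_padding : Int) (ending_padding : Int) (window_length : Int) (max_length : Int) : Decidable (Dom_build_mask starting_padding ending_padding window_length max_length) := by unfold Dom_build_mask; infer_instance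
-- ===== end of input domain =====

-- B replaces A's append/while/pop/pad/overwrite sequence with a single index-driven pass that
-- computes each element directly from its position (objective: simpler).

-- ===== PORT A =====
-- while len(mask) < bound: for j in range(window_length): mask.append(1); mask.append(0)
def pvBuildWhile (window_length : Int) (bound : Int) (mask : List Int) : List Int :=
  if h : (mask.length : Int) < bound then
    pvBuildWhile window_length bound
      (((PySem.List.pyRange 0 window_length 1).foldl (fun m _ => m ++ [(1 : Int)]) mask) ++ [0])
  else mask
termination_by (bound - mask.length).toNat
decreasing_by
  simp [PySem.List.foldl_append_singleton_eq_map]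
  omega

-- while len(mask) > max_length: mask.pop()
def pvTrimWhile (max_length : Int) (mask : List Int) : List Int :=
  if h : (max_length : Int) < mask.length then
    match hp : PySem.List.pop? mask with
    | some r => pvTrimWhile max_length r.2
    | none => mask   -- pop from an empty list raises IndexError in Python; excluded by Pre_
  else mask
termination_by mask.length
decreasing_by
  have := PySem.List.length_of_pop?_eq_some mask hp
  omega

-- while len(mask) < max_length: mask.append(0)
def pvPadWhile (max_length : Int) (mask : List Int) : List Int :=
  if h : (mask.length : Int) < max_length then pvPadWhile max_length (mask ++ [0]) else mask
termination_by (max_length - mask.length).toNat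
decreasing_by simp; omega

def build_mask (starting_padding : Int) (ending_padding : Int) (window_length : Int) (max_length : Int) : List Int :=
  -- for i in range(starting_padding): mask.append(0)
  let mask := (PySem.List.pyRange 0 starting_padding 1).foldl (fun m _ => m ++ [(0 : Int)]) []
  let mask := pvBuildWhile window_length (max_length - ending_padding) mask
  let mask := pvTrimWhile max_length mask
  let mask := pvPadWhile max_length mask
  -- for i in range(ending_padding): mask[max_length - i - 1] = 0
  (PySem.List.pyRange 0 ending_padding 1).foldl
    (fun m i => PySem.List.pySetD m (max_length - i - 1) 0) mask

-- ===== PORT B =====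
def build_mask_alt (starting_padding : Int) (ending_padding : Int) (window_length : Int) (max_length : Int) : List Int :=
  let body_start := max starting_padding 0
  let body_end := max_length - ending_padding
  (PySem.List.pyRange 0 max_length 1).map (fun i =>
    if window_length > 0 ∧ body_start ≤ i ∧ i < body_end ∧
        PySem.Int.mod (i - body_start) (window_length + 1) < window_length
    then (1 : Int) else 0)

-- ===== PRECONDITION & SPEC =====
-- Pre_ excludes exactly the inputs on which A raises IndexError: max_length < 0 (pop from an
-- empty list) and ending_padding > 2*max_length (final write loop indexes out of range).
def Pre_build_mask (starting_padding : Int) (ending_padding : Int) (window_length : Int) (max_length : Int) : Prop :=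
  0 ≤ max_length ∧ ending_padding ≤ 2 * max_length
instance (starting_padding : Int) (ending_padding : Int) (window_length : Int) (max_length : Int) : Decidable (Pre_build_mask starting_padding ending_padding window_length max_length) := by unfold Pre_build_mask; infer_instance

def pvWitness_build_mask : Int × Int × Int × Int := (2, 3, 3, 15)

def Spec_build_mask (starting_padding : Int) (ending_padding : Int) (window_length : Int) (max_length : Int) (out : List Int) : Prop := out = build_mask_alt starting_padding ending_padding window_length max_length
instance (starting_padding : Int) (ending_padding : Int) (window_length : Int) (max_length : Int) (out : List Int) : Decidable (Spec_build_mask starting_padding ending_padding window_length max_length out) := by unfold Spec_build_mask; infer_instance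

-- ===== CLAIM (what is proved, stated in full; the proofs are below) =====
def Claim_equal_build_mask : Prop := ∀ (starting_padding : Int) (ending_padding : Int) (window_length : Int) (max_length : Int), Dom_build_mask starting_padding ending_padding window_length max_length → Pre_build_mask starting_padding ending_padding window_length max_length → Spec_build_mask starting_padding ending_padding window_length max_length (build_mask starting_padding ending_padding window_length max_length)


-- ===== LEMMAS AND PROOFS =====

-- the position→value function both programs realise on the body (before the final zero-out)
def pvG (sp wl : Int) (i : Int) : Int :=
  if wl > 0 ∧ max sp 0 ≤ i ∧ PySem.Int.mod (i - max sp 0) (wl + 1) < wl then 1 else 0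

theorem pvG_block (sp wl : Int) (k : Nat) (j : Nat) (i : Nat)
    (hi : (i : Int) = max sp 0 + k * ((wl.toNat : Int) + 1) + j) (hj : j ≤ wl.toNat) :
    pvG sp wl i = if j < wl.toNat then 1 else 0 := by
  unfold pvG
  have hprod : (0:Int) ≤ (k:Int) * ((wl.toNat:Int)+1) := by positivity
  by_cases hw : 0 < wl
  · have hwn : (wl.toNat : Int) = wl := by omega
    have hmod : PySem.Int.mod ((i : Int) - max sp 0) (wl + 1) = j := by
      rw [PySem.Int.mod_eq_emod_of_pos (by omega)]
      have hv : (i : Int) - max sp 0 = (j : Int) + (wl + 1) * k := by rw [hi, hwn]; ring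
      rw [hv, Int.add_mul_emod_self_left, Int.emod_eq_of_lt (by omega) (by omega)]
    by_cases hjw : j < wl.toNat
    · rw [if_pos ⟨hw, by omega, by rw [hmod]; omega⟩, if_pos hjw]
    · rw [if_neg (by rintro ⟨-, -, hcon⟩; rw [hmod] at hcon; omega), if_neg hjw]
  · have : wl.toNat = 0 := by omega
    rw [if_neg (by rintro ⟨h, -, -⟩; omega), if_neg (by omega)]

theorem pvBuildWhile_aux (wl b sp : Int) (n : Nat) : ∀ (mask : List Int),
    (b - mask.length).toNat ≤ n →
    (∃ k : Nat, (mask.length : Int) = max sp 0 + k * ((wl.toNat : Int) + 1)) →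
    (∀ i : Nat, (h : i < mask.length) → mask[i] = pvG sp wl i) →
    (b ≤ ((pvBuildWhile wl b mask).length : Int)) ∧
    (∃ k : Nat, ((pvBuildWhile wl b mask).length : Int) = max sp 0 + k * ((wl.toNat : Int) + 1)) ∧
    (∀ i : Nat, (h : i < (pvBuildWhile wl b mask).length) →
      (pvBuildWhile wl b mask)[i] = pvG sp wl i) := by
  induction n with
  | zero =>
    intro mask hfuel halign hpt
    rw [pvBuildWhile, dif_neg (by omega)]
    exact ⟨by omega, halign, hpt⟩
  | succ n ih =>
    intro mask hfuel halign hpt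
    by_cases h : (mask.length : Int) < b
    · rw [pvBuildWhile, dif_pos h]
      obtain ⟨k, hk⟩ := halign
      have hfold : (PySem.List.pyRange 0 wl 1).foldl (fun m _ => m ++ [(1 : Int)]) mask
          = mask ++ (PySem.List.pyRange 0 wl 1).map (fun _ => (1 : Int)) :=
        PySem.List.foldl_append_singleton_eq_map (fun _ => (1 : Int)) _ mask
      rw [hfold]
      have hlr : (PySem.List.pyRange 0 wl 1).length = wl.toNat := by
        rw [PySem.List.length_pyRange_one]; congr 1; omega
      have hlen : ((mask ++ (PySem.List.pyRange 0 wl 1).map (fun _ => (1:Int)) ++ [0]).length : Int)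
          = mask.length + wl.toNat + 1 := by
        simp only [List.length_append, List.length_map, List.length_cons,
          List.length_nil, hlr]
        push_cast
        ring
      apply ih
      · rw [hlen] at *; omega
      · exact ⟨k + 1, by rw [hlen, hk]; push_cast; ring⟩
      · intro i hilen
        have hi3 : i < mask.length + wl.toNat + 1 := by
          simp [hlr] at hilen; omega
        by_cases h1 : i < mask.length
        · rw [List.getElem_append_left (by simp [hlr]; omega), List.getElem_append_left h1]
          exact hpt i h1
        · have h1' : mask.length ≤ i := by omega
          by_cases h2 : i < mask.length + wl.toNat
          · rw [List.getElem_append_left (by simp [hlr]; omega),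
              List.getElem_append_right (le_of_not_gt h1)]
            rw [List.getElem_map]
            rw [pvG_block sp wl k (i - mask.length) i (by push_cast; omega) (by omega)]
            rw [if_pos (by omega)]
          · have h2' : i = mask.length + wl.toNat := by omega
            rw [pvG_block sp wl k wl.toNat i (by push_cast; omega) le_rfl, if_neg (by omega)]
            rw [List.getElem_append_right (by simp [hlr]; omega), List.getElem_singleton]
    · rw [pvBuildWhile, dif_neg h]
      exact ⟨by omega, halign, hpt⟩

theorem pvTrimWhile_aux (m : Int) (hm : 0 ≤ m) (n : Nat) : ∀ (mask : List Int), mask.length ≤ n →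
    pvTrimWhile m mask = mask.take m.toNat := by
  induction n with
  | zero =>
    intro mask hn
    rw [pvTrimWhile, dif_neg (by omega)]
    rw [List.take_of_length_le (by omega)]
  | succ n ih =>
    intro mask hn
    by_cases h : m < (mask.length : Int)
    · have hne : mask ≠ [] := by intro he; subst he; simp at h; omega
      have hp : PySem.List.pop? mask = some (mask.getLast hne, mask.dropLast) := by
        conv_lhs => rw [← List.dropLast_concat_getLast hne]
        exact PySem.List.pop?_last _ _
      rw [pvTrimWhile, dif_pos h]
      split
      next r hr =>
        rw [hp] at hr
        cases hr
        rw [ih mask.dropLast (by simp; omega)]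
        rw [List.dropLast_eq_take, List.take_take]
        congr 1
        omega
      next hr =>
        rw [hp] at hr
        cases hr
    · rw [pvTrimWhile, dif_neg h, List.take_of_length_le (by omega)]

theorem pvTrimWhile_eq_take (m : Int) (hm : 0 ≤ m) (mask : List Int) :
    pvTrimWhile m mask = mask.take m.toNat :=
  pvTrimWhile_aux m hm mask.length mask le_rfl

theorem pvPadWhile_aux (m : Int) (n : Nat) : ∀ (mask : List Int), (m - mask.length).toNat ≤ n →
    pvPadWhile m mask = mask ++ List.replicate (m.toNat - mask.length) 0 := by
  induction n with
  | zero =>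
    intro mask hn
    rw [pvPadWhile, dif_neg (by omega)]
    have : m.toNat - mask.length = 0 := by omega
    simp [this]
  | succ n ih =>
    intro mask hn
    by_cases h : (mask.length : Int) < m
    · rw [pvPadWhile, dif_pos h]
      rw [ih (mask ++ [0]) (by simp; omega)]
      simp only [List.append_assoc, List.length_append, List.length_singleton]
      congr 1
      have h1 : m.toNat - mask.length = (m.toNat - (mask.length + 1)) + 1 := by omega
      rw [h1, List.replicate_succ]
      rfl
    · rw [pvPadWhile, dif_neg h]
      have : m.toNat - mask.length = 0 := by omega
      simp [this]

theorem pvPadWhile_eq_append (m : Int) (mask : List Int) :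
    pvPadWhile m mask = mask ++ List.replicate (m.toNat - mask.length) 0 :=
  pvPadWhile_aux m _ mask le_rfl

def pvZeroed (m e : Int) (mask : List Int) : List Int :=
  mask.zipIdx.map (fun p => if m - e ≤ (p.2 : Int) then 0 else p.1)

theorem length_pvZeroed (m e : Int) (mask : List Int) : (pvZeroed m e mask).length = mask.length := by
  simp [pvZeroed]

theorem getElem_pvZeroed (m e : Int) (mask : List Int) (j : Nat) (hj : j < mask.length) :
    (pvZeroed m e mask)[j]'(by simp [length_pvZeroed, hj]) =
      if m - e ≤ (j : Int) then 0 else mask[j] := by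
  simp [pvZeroed]

theorem pvSetD_neg (xs : List Int) (i : Int) (v : Int) (h0 : i < 0) (h1 : -(xs.length : Int) ≤ i) :
    PySem.List.pySetD xs i v = xs.set (xs.length - (-i).toNat) v := by
  unfold PySem.List.pySetD PySem.List.pySet? PySem.List.pyIdx?
  rw [if_neg (by omega), if_pos h1]
  rfl

theorem pvZeroLoop_eq (m : Int) (hm : 0 ≤ m) (mask : List Int) (hlen : (mask.length : Int) = m) :
    ∀ (e : Nat), (e : Int) ≤ 2 * m →
    (PySem.List.pyRange 0 (e : Int) 1).foldl (fun ms i => PySem.List.pySetD ms (m - i - 1) 0) mask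
      = pvZeroed m e mask := by
  intro e
  induction e with
  | zero =>
    intro _
    rw [show ((0:Nat):Int) = 0 by rfl, PySem.List.pyRange_one_eq_nil le_rfl]
    simp only [List.foldl_nil]
    apply List.ext_getElem (by rw [length_pvZeroed])
    intro j h1 h2
    rw [getElem_pvZeroed m 0 mask j h1]
    rw [if_neg (by omega)]
  | succ e ih =>
    intro he
    have he' : (e : Int) ≤ 2 * m := by push_cast at he ⊢; omega
    have hsplit : PySem.List.pyRange 0 ((e:Nat)+1 : Int) 1 = PySem.List.pyRange 0 (e : Int) 1 ++ [(e : Int)] :=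
      PySem.List.pyRange_one_succ_right (by positivity)
    rw [show (((e+1:Nat)):Int) = ((e:Nat):Int)+1 by push_cast; ring, hsplit, List.foldl_append]
    rw [ih he']
    simp only [List.foldl_cons, List.foldl_nil]
    have hlz : ((pvZeroed m e mask).length : Int) = m := by rw [length_pvZeroed]; exact hlen
    by_cases hr : 0 ≤ m - (e : Int) - 1
    · rw [PySem.List.pySetD_of_nonneg _ _ hr]
      apply List.ext_getElem (by simp [length_pvZeroed])
      intro j h1 h2
      rw [List.getElem_set]
      have hj : j < mask.length := by simpa [length_pvZeroed] using h2
      rw [getElem_pvZeroed m (e+1) mask j hj]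
      by_cases hq : (m - (e:Int) - 1).toNat = j
      · rw [if_pos hq, if_pos (by omega)]
      · rw [if_neg hq]
        rw [getElem_pvZeroed m e mask j hj]
        rw [if_congr (show (m - (e:Int) ≤ (j:Int)) ↔ (m - ((e:Int)+1) ≤ (j:Int)) from by omega) rfl rfl]
    · rw [pvSetD_neg _ _ _ (by omega) (by omega)]
      apply List.ext_getElem (by simp [length_pvZeroed])
      intro j h1 h2
      rw [List.getElem_set]
      have hj : j < mask.length := by simpa [length_pvZeroed] using h2
      rw [getElem_pvZeroed m (e+1) mask j hj]
      rw [if_pos (show m - ((e:Int) + 1) ≤ (j:Int) from by omega)]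
      split
      · rfl
      · rw [getElem_pvZeroed m e mask j (by simpa [length_pvZeroed] using h2)]
        rw [if_pos (by omega)]

theorem pvZeroLoop_eq_int (m : Int) (hm : 0 ≤ m) (mask : List Int) (hlen : (mask.length : Int) = m)
    (e : Int) (he : e ≤ 2 * m) :
    (PySem.List.pyRange 0 e 1).foldl (fun ms i => PySem.List.pySetD ms (m - i - 1) 0) mask
      = pvZeroed m e mask := by
  by_cases h0 : 0 ≤ e
  · have hc : ((e.toNat : Nat) : Int) = e := by omega
    rw [← hc]
    exact pvZeroLoop_eq m hm mask hlen e.toNat (by omega)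
  · rw [PySem.List.pyRange_one_eq_nil (by omega)]
    simp only [List.foldl_nil]
    apply List.ext_getElem (by rw [length_pvZeroed])
    intro j h1 h2
    rw [getElem_pvZeroed m e mask j h1]
    rw [if_neg (by omega)]

-- ===== VERDICT (by name: the statement is the Claim_ definition above) =====
theorem build_mask_spec : Claim_equal_build_mask := by
  unfold Claim_equal_build_mask Spec_build_mask Pre_build_mask
  intro sp ep wl ml _ hpre
  obtain ⟨hml, hep⟩ := hpre
  unfold build_mask build_mask_alt
  dsimp only
  rw [PySem.List.foldl_append_singleton_eq_map, List.nil_append]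
  set mask0 := (PySem.List.pyRange 0 sp 1).map (fun _ => (0:Int)) with hmask0
  have hlen0 : (mask0.length : Int) = max sp 0 := by
    simp [hmask0, PySem.List.length_pyRange_one]
  have hpt0 : ∀ i : Nat, (h : i < mask0.length) → mask0[i] = pvG sp wl i := by
    intro i hi
    have hlt : (i : Int) < max sp 0 := by rw [← hlen0]; exact_mod_cast hi
    simp only [hmask0, List.getElem_map]
    unfold pvG
    rw [if_neg (by rintro ⟨-, hle, -⟩; omega)]
  obtain ⟨hB1len, -, hB1pt⟩ :=
    pvBuildWhile_aux wl (ml - ep) sp ((ml - ep) - mask0.length).toNat mask0 le_rfl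
      ⟨0, by rw [hlen0]; ring⟩ hpt0
  set B1 := pvBuildWhile wl (ml - ep) mask0 with hB1
  rw [pvTrimWhile_eq_take ml hml, pvPadWhile_eq_append]
  set mask3 := B1.take ml.toNat ++ List.replicate (ml.toNat - (B1.take ml.toNat).length) 0 with hm3
  have hlen3 : mask3.length = ml.toNat := by
    simp [hm3]
  rw [pvZeroLoop_eq_int ml hml mask3 (by omega) ep hep]
  apply List.ext_getElem (by simp [length_pvZeroed, hlen3, PySem.List.length_pyRange_one])
  intro j h1 h2
  have hj3 : j < mask3.length := by simpa [length_pvZeroed] using h1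
  have hjm : j < ml.toNat := by omega
  rw [getElem_pvZeroed ml ep mask3 j hj3]
  rw [List.getElem_map, PySem.List.getElem_pyRange_one]
  simp only [zero_add]
  by_cases hcut : ml - ep ≤ (j : Int)
  · rw [if_pos hcut, if_neg (by rintro ⟨-, -, hlt, -⟩; omega)]
  · rw [if_neg hcut]
    have hjB1 : j < B1.length := by omega
    have hjt : j < (B1.take ml.toNat).length := by simp; omega
    have hm3j : mask3[j]'hj3 = B1[j]'hjB1 := by
      simp only [hm3]
      rw [List.getElem_append_left hjt, List.getElem_take]
    rw [hm3j, hB1pt j hjB1]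
    unfold pvG
    rcases Decidable.em (wl > 0 ∧ max sp 0 ≤ (j:Int) ∧
        PySem.Int.mod ((j:Int) - max sp 0) (wl + 1) < wl) with hc | hc
    · rw [if_pos hc, if_pos ⟨hc.1, hc.2.1, by omega, hc.2.2⟩]
    · rw [if_neg hc, if_neg (by rintro ⟨a, b, -, c⟩; exact hc ⟨a, b, c⟩)]
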